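-- pv_equiv track=rewrite | github.com/anuhir651ui/ai-radar | scripts/generate_report.py | categorize_repo
-- ===== SOURCE A (Python) =====
-- from typing import Any, Dict, List, Tuple, Optional
--
-- B2B_MARKERS = [
--     "sdk", "api", "framework", "orchestration", "observability", "eval",
--     "deployment", "inference", "rag", "vector", "workflow", "agent",
--     "enterprise", "platform", "infrastructure", "pipeline", "cloud",
--     "saas", "b2b", "developer", "devtools", "backend", "server",
--     "microservice", "kubernetes", "docker", "terraform", "security",
--     "compliance", "soc2", "sso", "rbac", "audit",
-- ]
--
-- CONSUMER_MARKERS = [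
--     "mobile", "ios", "android", "photo", "video", "music", "game",
--     "keyboard", "browser", "camera", "creative", "social", "personal",
--     "assistant", "chat", "consumer", "desktop", "app", "chrome",
--     "extension", "plugin", "note", "writing", "productivity",
-- ]
--
-- def categorize_repo(desc: str, topics: List[str]) -> str:
--     blob = (desc + " " + " ".join(topics or [])).lower()
--     b2b = sum(1 for m in B2B_MARKERS if m in blob)
--     consumer = sum(1 for m in CONSUMER_MARKERS if m in blob)
--     if b2b > consumer:
--         return "B2B SaaS"
--     if consumer > b2b:
--         return "Consumer"
--     return "B2B SaaS"
-- ===== SOURCE B (Python) =====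
-- from typing import List
--
-- B2B_MARKERS = [
--     "sdk", "api", "framework", "orchestration", "observability", "eval",
--     "deployment", "inference", "rag", "vector", "workflow", "agent",
--     "enterprise", "platform", "infrastructure", "pipeline", "cloud",
--     "saas", "b2b", "developer", "devtools", "backend", "server",
--     "microservice", "kubernetes", "docker", "terraform", "security",
--     "compliance", "soc2", "sso", "rbac", "audit",
-- ]
--
-- CONSUMER_MARKERS = [
--     "mobile", "ios", "android", "photo", "video", "music", "game",
--     "keyboard", "browser", "camera", "creative", "social", "personal",
--     "assistant", "chat", "consumer", "desktop", "app", "chrome",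
--     "extension", "plugin", "note", "writing", "productivity",
-- ]
--
-- ALL_MARKERS = B2B_MARKERS + CONSUMER_MARKERS
--
-- def categorize_repo(desc: str, topics: List[str]) -> str:
--     # Text-driven multi-pattern scan: walk the blob position by position,
--     # collect into a set every marker that starts at some position, then
--     # compare how many markers of each kind were ever seen.
--     blob = (desc + " " + " ".join(topics or [])).lower()
--     matched = set()
--     for i in range(len(blob) + 1):
--         for m in ALL_MARKERS:
--             if blob.startswith(m, i):
--                 matched.add(m)
--     b2b = sum(1 for m in B2B_MARKERS if m in matched)
--     consumer = sum(1 for m in CONSUMER_MARKERS if m in matched)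
--     return "Consumer" if consumer > b2b else "B2B SaaS"
-- ===== Notes on version B (the rewrite author's own statement) =====
-- stated objective: alternative
-- what changed: Replaces per-marker substring searches with a text-driven scan: walk the blob position by position, collect every marker that starts at some position into a set, then count the set's members per category.
import Mathlib
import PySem

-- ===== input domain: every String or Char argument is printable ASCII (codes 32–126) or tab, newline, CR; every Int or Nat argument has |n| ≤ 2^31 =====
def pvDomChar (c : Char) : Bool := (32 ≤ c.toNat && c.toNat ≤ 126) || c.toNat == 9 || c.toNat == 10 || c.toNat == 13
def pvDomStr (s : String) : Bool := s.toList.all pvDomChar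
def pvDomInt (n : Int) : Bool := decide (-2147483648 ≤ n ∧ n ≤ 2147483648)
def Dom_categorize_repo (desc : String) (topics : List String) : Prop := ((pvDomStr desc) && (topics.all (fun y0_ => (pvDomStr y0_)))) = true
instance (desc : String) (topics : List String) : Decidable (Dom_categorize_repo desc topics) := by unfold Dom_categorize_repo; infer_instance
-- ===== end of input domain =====

-- B replaces per-marker substring searches by a text-driven scan that collects a set of matched markers; same value, similar cost.

-- ===== PORT A =====
def B2B_MARKERS : List String := [
  "sdk", "api", "framework", "orchestration", "observability", "eval",
  "deployment", "inference", "rag", "vector", "workflow", "agent",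
  "enterprise", "platform", "infrastructure", "pipeline", "cloud",
  "saas", "b2b", "developer", "devtools", "backend", "server",
  "microservice", "kubernetes", "docker", "terraform", "security",
  "compliance", "soc2", "sso", "rbac", "audit"]

def CONSUMER_MARKERS : List String := [
  "mobile", "ios", "android", "photo", "video", "music", "game",
  "keyboard", "browser", "camera", "creative", "social", "personal",
  "assistant", "chat", "consumer", "desktop", "app", "chrome",
  "extension", "plugin", "note", "writing", "productivity"]

def categorize_repo (desc : String) (topics : List String) : String :=
  let blob := PySem.Str.lower (PySem.Str.join " " [desc, PySem.Str.join " " topics])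
  let b2b : Int := (B2B_MARKERS.countP (fun m => PySem.Str.isIn m blob) : Int)
  let consumer : Int := (CONSUMER_MARKERS.countP (fun m => PySem.Str.isIn m blob) : Int)
  if b2b > consumer then "B2B SaaS"
  else if consumer > b2b then "Consumer"
  else "B2B SaaS"

-- ===== PORT B =====
def ALL_MARKERS : List String := B2B_MARKERS ++ CONSUMER_MARKERS

def categorize_repo_alt (desc : String) (topics : List String) : String :=
  let blob := PySem.Str.lower (PySem.Str.join " " [desc, PySem.Str.join " " topics])
  let cl := blob.toList
  -- blob.startswith(m, i) with 0 ≤ i ≤ len(blob) is exactly m.toList.isPrefixOf (cl.drop i.toNat)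
  let matched : PySem.Set String :=
    (PySem.List.pyRange 0 ((cl.length : Int) + 1) 1).foldl (fun s i =>
      ALL_MARKERS.foldl (fun s m =>
        if m.toList.isPrefixOf (cl.drop i.toNat) then PySem.Set.add s m else s) s)
      PySem.Set.empty
  let b2b : Int := (B2B_MARKERS.countP (fun m => PySem.Set.contains matched m) : Int)
  let consumer : Int := (CONSUMER_MARKERS.countP (fun m => PySem.Set.contains matched m) : Int)
  if consumer > b2b then "Consumer" else "B2B SaaS"

-- ===== PRECONDITION & SPEC =====
def Spec_categorize_repo (desc : String) (topics : List String) (out : String) : Prop := out = categorize_repo_alt desc topics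
instance (desc : String) (topics : List String) (out : String) : Decidable (Spec_categorize_repo desc topics out) := by unfold Spec_categorize_repo; infer_instance

-- ===== CLAIM (what is proved, stated in full; the proofs are below) =====
def Claim_equal_categorize_repo : Prop := ∀ (desc : String) (topics : List String), Dom_categorize_repo desc topics → Spec_categorize_repo desc topics (categorize_repo desc topics)

-- ===== LEMMAS AND PROOFS =====

-- the inner fold adds exactly the markers that start at the given position
theorem mem_inner_fold (ms : List String) (t : List Char) (s : PySem.Set String) (x : String) :
    (x ∈ ms.foldl (fun s m => if m.toList.isPrefixOf t then PySem.Set.add s m else s) s) ↔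
      x ∈ s ∨ (x ∈ ms ∧ x.toList.isPrefixOf t) := by
  induction ms generalizing s with
  | nil => simp
  | cons y ys ih =>
    rw [List.foldl_cons, ih]
    by_cases h : y.toList.isPrefixOf t = true
    · simp only [if_pos h, PySem.Set.mem_add, List.mem_cons]
      constructor
      · rintro (⟨hs | rfl⟩ | h2)
        · exact Or.inl hs
        · exact Or.inr ⟨Or.inl rfl, h⟩
        · exact Or.inr ⟨Or.inr h2.1, h2.2⟩
      · rintro (hs | ⟨rfl | hm, hp⟩)
        · exact Or.inl (Or.inl hs)
        · exact Or.inl (Or.inr rfl)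
        · exact Or.inr ⟨hm, hp⟩
    · simp only [if_neg h, List.mem_cons]
      constructor
      · rintro (hs | h2)
        · exact Or.inl hs
        · exact Or.inr ⟨Or.inr h2.1, h2.2⟩
      · rintro (hs | ⟨rfl | hm, hp⟩)
        · exact Or.inl hs
        · exact absurd hp h
        · exact Or.inr ⟨hm, hp⟩

-- the outer fold over positions collects exactly the markers starting at some position
theorem mem_outer_fold (ps : List Int) (cl : List Char) (s : PySem.Set String) (x : String) :
    (x ∈ ps.foldl (fun s i =>
        ALL_MARKERS.foldl (fun s m =>
          if m.toList.isPrefixOf (cl.drop i.toNat) then PySem.Set.add s m else s) s) s) ↔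
      x ∈ s ∨ (x ∈ ALL_MARKERS ∧ ∃ i ∈ ps, x.toList.isPrefixOf (cl.drop i.toNat)) := by
  induction ps generalizing s with
  | nil => simp
  | cons p ps ih =>
    rw [List.foldl_cons, ih, mem_inner_fold]
    constructor
    · rintro ((hs | ⟨hm, hp⟩) | ⟨hm, i, hi, hp⟩)
      · exact Or.inl hs
      · exact Or.inr ⟨hm, p, List.mem_cons_self, hp⟩
      · exact Or.inr ⟨hm, i, List.mem_cons_of_mem _ hi, hp⟩
    · rintro (hs | ⟨hm, i, hi, hp⟩)
      · exact Or.inl (Or.inl hs)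
      · rcases List.mem_cons.mp hi with rfl | hi
        · exact Or.inl (Or.inr ⟨hm, hp⟩)
        · exact Or.inr ⟨hm, i, hi, hp⟩

-- a marker is in the matched set iff it is a substring of the blob
theorem mem_matched_iff (cl : List Char) (x : String) (hx : x ∈ ALL_MARKERS) :
    (x ∈ (PySem.List.pyRange 0 ((cl.length : Int) + 1) 1).foldl (fun s i =>
        ALL_MARKERS.foldl (fun s m =>
          if m.toList.isPrefixOf (cl.drop i.toNat) then PySem.Set.add s m else s) s)
        PySem.Set.empty) ↔ PySem.Chars.isIn x.toList cl = true := by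
  rw [mem_outer_fold]
  rw [← PySem.Chars.exists_prefix_drop_iff_isIn]
  constructor
  · rintro (hs | ⟨_, i, _, hp⟩)
    · simp [PySem.Set.empty] at hs
    · exact ⟨i.toNat, List.isPrefixOf_iff_prefix.mp hp⟩
  · rintro ⟨j, hj⟩
    refine Or.inr ⟨hx, (min j cl.length : Nat), ?_, ?_⟩
    · rw [PySem.List.mem_pyRange_one]
      constructor
      · exact Int.natCast_nonneg _
      · have : min j cl.length ≤ cl.length := Nat.min_le_right _ _
        omega
    · rw [Int.toNat_natCast, List.isPrefixOf_iff_prefix]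
      rcases Nat.le_total j cl.length with h | h
      · rwa [Nat.min_eq_left h]
      · rw [Nat.min_eq_right h]
        have h1 : cl.drop j = [] := List.drop_eq_nil_of_le h
        have h2 : cl.drop cl.length = [] := List.drop_eq_nil_of_le le_rfl
        rw [h2]; rw [h1] at hj; exact hj

theorem categorize_repo_spec : Claim_equal_categorize_repo := by
  intro desc topics _
  unfold Spec_categorize_repo categorize_repo categorize_repo_alt
  set blob := PySem.Str.lower (PySem.Str.join " " [desc, PySem.Str.join " " topics]) with hb
  have hcount : ∀ ms : List String, ms ⊆ ALL_MARKERS →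
      ms.countP (fun m => PySem.Set.contains ((PySem.List.pyRange 0 ((blob.toList.length : Int) + 1) 1).foldl (fun s i =>
        ALL_MARKERS.foldl (fun s m =>
          if m.toList.isPrefixOf (blob.toList.drop i.toNat) then PySem.Set.add s m else s) s)
        PySem.Set.empty) m)
      = ms.countP (fun m => PySem.Str.isIn m blob) := by
    intro ms hsub
    apply List.countP_congr
    intro m hm
    rw [PySem.Set.contains_iff, mem_matched_iff blob.toList m (hsub hm), PySem.Str.isIn_eq]
  have hsub1 : B2B_MARKERS ⊆ ALL_MARKERS := fun a ha => List.mem_append_left _ ha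
  have hsub2 : CONSUMER_MARKERS ⊆ ALL_MARKERS := fun a ha => List.mem_append_right _ ha
  simp only [hcount B2B_MARKERS hsub1, hcount CONSUMER_MARKERS hsub2]
  split_ifs with h1 h2 h3 <;> first | rfl | omega
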